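-- pv_equiv track=rewrite | github.com/IPU-ChenFei/ipu_icx_network_toolkit | src/accelerator/lib/esxi.py | get_datastore_relative_path
-- ===== SOURCE A (Python) =====
-- def get_datastore_relative_path(path):
--     path_items = path.split('/')
--     target = -1
--     for i in range(len(path_items)):
--         if 'datastore' in path_items[i]:
--             target = i
--             break
--     if target == -1:
--         raise Exception(f"error: cannot find keyword 'datastore' in {path}")
--     return "/".join(path_items[target + 1:]) if path_items[-1] != '' else "/".join(path_items[target + 1:-1])
-- ===== SOURCE B (Python) =====
-- def get_datastore_relative_path(path):
--     def rel(s):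
--         head, sep, tail = s.partition('/')
--         if 'datastore' in head:
--             return tail
--         if not sep:
--             raise Exception(f"error: cannot find keyword 'datastore' in {path}")
--         return rel(tail)
--     r = rel(path)
--     return r[:-1] if path.endswith('/') else r
-- ===== Notes on version B (the rewrite author's own statement) =====
-- stated objective: simpler
-- what changed: Replaces split-into-list + index loop + slice/join with a direct recursive scan using str.partition: strip components up to the first one containing 'datastore', return the raw remainder, and drop one trailing '/' if the input ended with one.
import Mathlib
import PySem

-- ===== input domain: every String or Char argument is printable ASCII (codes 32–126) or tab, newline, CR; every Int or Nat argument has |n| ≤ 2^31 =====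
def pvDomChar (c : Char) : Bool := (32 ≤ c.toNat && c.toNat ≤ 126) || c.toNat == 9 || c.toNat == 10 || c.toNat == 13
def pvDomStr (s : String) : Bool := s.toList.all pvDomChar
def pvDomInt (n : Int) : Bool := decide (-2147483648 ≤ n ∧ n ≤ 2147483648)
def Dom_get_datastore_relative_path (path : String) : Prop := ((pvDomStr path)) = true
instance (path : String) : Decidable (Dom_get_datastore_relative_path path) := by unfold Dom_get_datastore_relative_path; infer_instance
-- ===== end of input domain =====

-- B replaces A's split-into-list + index loop + slice/join with a recursive partition('/')
-- scan returning the raw remainder (objective: simpler; same O(n) cost).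

-- ===== PORT A =====
-- the loop "for i in range(len(path_items)): if 'datastore' in path_items[i]: target = i; break"
def pvFindLoop (items : List String) (i : Int) : Int :=
  match items with
  | [] => -1
  | x :: rest => if PySem.Str.isIn "datastore" x then i else pvFindLoop rest (i + 1)

def get_datastore_relative_path (path : String) : String :=
  let path_items := (PySem.Str.split? path "/").getD []  -- sep "/" ≠ "", so split? is always some
  let target := pvFindLoop path_items 0
  -- target = -1 → Python raises; those inputs are excluded by Pre_
  if PySem.List.pyGetD path_items (-1) "" ≠ "" then
    PySem.Str.join "/" (PySem.List.slice path_items (some (target + 1)) none)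
  else
    PySem.Str.join "/" (PySem.List.slice path_items (some (target + 1)) (some (-1)))

-- ===== PORT B =====
-- s.partition('/') for the single-character separator '/', ported by hand
-- (exact: split at the FIRST '/'; no '/' → (s, False, '') — the Bool is "sep found")
def pvPartitionSlash (s : List Char) : List Char × Bool × List Char :=
  match s with
  | [] => ([], false, [])
  | c :: rest =>
    if c = '/' then ([], true, rest)
    else
      let p := pvPartitionSlash rest
      (c :: p.1, p.2.1, p.2.2)

lemma pvPartitionSlash_tail_lt (s : List Char) (h : (pvPartitionSlash s).2.1 = true) :
    (pvPartitionSlash s).2.2.length < s.length := by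
  induction s with
  | nil => simp [pvPartitionSlash] at h
  | cons c rest ih =>
    by_cases hc : c = '/'
    · simp [pvPartitionSlash, hc]
    · simp only [pvPartitionSlash, if_neg hc] at h ⊢
      exact Nat.lt_succ_of_lt (ih h)

-- the inner recursive helper "rel"
def pvRel (s : List Char) : List Char :=
  let p := pvPartitionSlash s
  if PySem.Chars.isIn "datastore".toList p.1 then p.2.2
  else if h : p.2.1 then pvRel p.2.2
  else []  -- Python raises here; those inputs are excluded by Pre_
termination_by s.length
decreasing_by exact pvPartitionSlash_tail_lt s h

def get_datastore_relative_path_alt (path : String) : String :=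
  let r := String.ofList (pvRel path.toList)
  if PySem.Str.endswith path "/" then PySem.Str.slice r none (some (-1)) else r

-- ===== PRECONDITION & SPEC =====
-- Pre_ excludes exactly the inputs on which A raises: paths not containing 'datastore'.
def Pre_get_datastore_relative_path (path : String) : Prop :=
  PySem.Str.isIn "datastore" path = true
instance (path : String) : Decidable (Pre_get_datastore_relative_path path) := by
  unfold Pre_get_datastore_relative_path; infer_instance

def pvWitness_get_datastore_relative_path : String := "vmfs/datastore1/vm/disk.vmdk"

def Spec_get_datastore_relative_path (path : String) (out : String) : Prop := out = get_datastore_relative_path_alt path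
instance (path : String) (out : String) : Decidable (Spec_get_datastore_relative_path path out) := by unfold Spec_get_datastore_relative_path; infer_instance

-- ===== CLAIM (what is proved, stated in full; the proofs are below) =====
def Claim_equal_get_datastore_relative_path : Prop := ∀ (path : String), Dom_get_datastore_relative_path path → Pre_get_datastore_relative_path path → Spec_get_datastore_relative_path path (get_datastore_relative_path path)

-- ===== LEMMAS AND PROOFS =====

-- proof-side abbreviation for "datastore".toList
def pvDS : List Char := "datastore".toList

-- proof-side model of path.split('/')
def pvMySplit (s : List Char) : List (List Char) :=
  let p := pvPartitionSlash s
  if h : p.2.1 then p.1 :: pvMySplit p.2.2 else [s]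
termination_by s.length
decreasing_by exact pvPartitionSlash_tail_lt s h

-- first index of an item containing 'datastore' (defined when one exists)
def pvFirstIdx (l : List (List Char)) : Nat :=
  match l with
  | [] => 0
  | x :: r => if PySem.Chars.isIn pvDS x then 0 else pvFirstIdx r + 1

-- what remains after dropping everything up to and including the first 'datastore' item
def pvDropAfter (l : List (List Char)) : List (List Char) :=
  match l with
  | [] => []
  | x :: r => if PySem.Chars.isIn pvDS x then r else pvDropAfter r

-- partition correctness
lemma pvPartition_found (s : List Char) (h : (pvPartitionSlash s).2.1 = true) :
    s = (pvPartitionSlash s).1 ++ '/' :: (pvPartitionSlash s).2.2 ∧ '/' ∉ (pvPartitionSlash s).1 := by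
  induction s with
  | nil => simp [pvPartitionSlash] at h
  | cons c rest ih =>
    by_cases hc : c = '/'
    · simp [pvPartitionSlash, hc]
    · simp only [pvPartitionSlash, if_neg hc] at h ⊢
      obtain ⟨h1, h2⟩ := ih h
      refine ⟨by simpa using congrArg (c :: ·) h1, ?_⟩
      simp only [List.mem_cons, not_or]
      exact ⟨fun hx => hc hx.symm, h2⟩

lemma pvPartition_not_found (s : List Char) (h : (pvPartitionSlash s).2.1 = false) :
    (pvPartitionSlash s).1 = s ∧ (pvPartitionSlash s).2.2 = [] ∧ '/' ∉ s := by
  induction s with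
  | nil => simp [pvPartitionSlash]
  | cons c rest ih =>
    by_cases hc : c = '/'
    · simp [pvPartitionSlash, hc] at h
    · simp only [pvPartitionSlash, if_neg hc] at h ⊢
      obtain ⟨h1, h2, h3⟩ := ih h
      refine ⟨by simp [h1], h2, ?_⟩
      simp only [List.mem_cons, not_or]
      exact ⟨fun hx => hc hx.symm, h3⟩

lemma pvMySplit_ne_nil (s : List Char) : pvMySplit s ≠ [] := by
  rw [pvMySplit]
  split <;> simp

-- splitOn = pvMySplit
lemma pvMySplit_nil : pvMySplit [] = [[]] := by
  rw [pvMySplit]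
  simp [pvPartitionSlash]

lemma pvMySplit_cons (c : Char) (s : List Char) :
    pvMySplit (c :: s) = if c = '/' then [] :: pvMySplit s else (pvMySplit s).modifyHead (c :: ·) := by
  by_cases hc : c = '/'
  · rw [pvMySplit]
    simp [pvPartitionSlash, hc]
  · have e : pvPartitionSlash (c :: s) =
        (c :: (pvPartitionSlash s).1, (pvPartitionSlash s).2.1, (pvPartitionSlash s).2.2) := by
      simp only [pvPartitionSlash]
      rw [if_neg hc]
    rw [if_neg hc]
    conv_lhs => rw [pvMySplit]
    conv_rhs => rw [pvMySplit]
    rw [e]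
    by_cases hf : (pvPartitionSlash s).2.1 = true
    · simp [hf]
    · simp only [Bool.not_eq_true] at hf
      simp [hf]

lemma pvSplitOn_go (fuel : Nat) (l cur : List Char) (acc : List (List Char)) (h : l.length < fuel) :
    PySem.Chars.splitOn.go ['/'] fuel l cur acc = acc.reverse ++ (pvMySplit l).modifyHead (cur.reverse ++ ·) := by
  induction fuel generalizing l cur acc with
  | zero => omega
  | succ fuel ih =>
    match l with
    | [] =>
      rw [PySem.Chars.splitOn.go.eq_def]
      simp [pvMySplit_nil]
    | c :: rest =>
      rw [PySem.Chars.splitOn.go.eq_def]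
      have hlen : rest.length < fuel := by simpa using h
      by_cases hc : c = '/'
      · subst hc
        have hpre : List.isPrefixOf ['/'] ('/' :: rest) = true := by
          simp [List.isPrefixOf]
        simp only [hpre, if_pos rfl]
        have hd : List.drop ['/'].length ('/' :: rest) = rest := rfl
        rw [hd, ih _ _ _ hlen, pvMySplit_cons]
        rcases hM : pvMySplit rest with _ | ⟨m0, mr⟩
        · exact absurd hM (pvMySplit_ne_nil rest)
        · simp [List.append_assoc]
      · have hpre : List.isPrefixOf ['/'] (c :: rest) = false := by
          simp [List.isPrefixOf]
          intro hx
          exact absurd hx.symm hc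
        simp only [hpre, Bool.false_eq_true, if_false]
        rw [ih _ _ _ hlen]
        rcases hM : pvMySplit rest with _ | ⟨m0, mr⟩
        · exact absurd hM (pvMySplit_ne_nil rest)
        · simp [pvMySplit_cons, hc, hM, List.append_assoc]

lemma pvSplitOn_eq (s : List Char) : PySem.Chars.splitOn s ['/'] = pvMySplit s := by
  have h := pvSplitOn_go (s.length + 1) s [] [] (by omega)
  rcases hM : pvMySplit s with _ | ⟨m0, mr⟩
  · exact absurd hM (pvMySplit_ne_nil s)
  · simpa [PySem.Chars.splitOn, hM] using h

-- join inverts split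
lemma pvJoin_mySplit (s : List Char) : PySem.Chars.join ['/'] (pvMySplit s) = s := by
  induction s using pvMySplit.induct with
  | case1 s p hf ih =>
    have hf' : (pvPartitionSlash s).2.1 = true := hf
    have ih' : PySem.Chars.join ['/'] (pvMySplit (pvPartitionSlash s).2.2) = (pvPartitionSlash s).2.2 := ih
    rw [pvMySplit]
    simp only [hf', dite_true]
    obtain ⟨hs, -⟩ := pvPartition_found s hf'
    rcases hM : pvMySplit (pvPartitionSlash s).2.2 with _ | ⟨m0, mr⟩
    · exact absurd hM (pvMySplit_ne_nil _)
    · rw [hM] at ih'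
      rw [PySem.Chars.join_cons_cons]
      conv_rhs => rw [hs]
      rw [← ih']
      simp
  | case2 s p hf =>
    have hf' : ¬ ((pvPartitionSlash s).2.1 = true) := hf
    rw [pvMySplit]
    simp only [hf']
    exact PySem.Chars.join_singleton _ _

-- a slash-free prefix of h ++ '/' :: t is a prefix of h
lemma pvPrefix_no_slash (p h t : List Char) (hp : '/' ∉ p) (hpre : p <+: h ++ '/' :: t) : p <+: h := by
  induction p generalizing h with
  | nil => exact List.nil_prefix
  | cons a p' ih =>
    cases h with
    | nil =>
      rw [List.nil_append, List.cons_prefix_cons] at hpre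
      exact absurd (by rw [hpre.1]; exact List.mem_cons_self) hp
    | cons b h' =>
      rw [List.cons_append, List.cons_prefix_cons] at hpre
      rw [List.cons_prefix_cons]
      exact ⟨hpre.1, ih h' (fun hx => hp (List.mem_cons_of_mem a hx)) hpre.2⟩

-- a slash-free infix of h ++ '/' :: t cannot straddle the separator
lemma pvInfix_split (p h t : List Char) (hp : '/' ∉ p) :
    p <:+: h ++ '/' :: t ↔ p <:+: h ∨ p <:+: t := by
  constructor
  · intro hinf
    induction h with
    | nil =>
      rw [List.nil_append, List.infix_cons_iff] at hinf
      rcases hinf with hpre | hinf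
      · rcases p with _ | ⟨a, p'⟩
        · exact Or.inl (List.nil_infix)
        · rw [List.cons_prefix_cons] at hpre
          exact absurd (by rw [hpre.1]; exact List.mem_cons_self) hp
      · exact Or.inr hinf
    | cons b h' ih =>
      rw [List.cons_append, List.infix_cons_iff] at hinf
      rcases hinf with hpre | hinf
      · rcases p with _ | ⟨a, p'⟩
        · exact Or.inl (List.nil_infix)
        · rw [List.cons_prefix_cons] at hpre
          have hpf : a :: p' <+: b :: h' := by
            rw [List.cons_prefix_cons]
            exact ⟨hpre.1, pvPrefix_no_slash p' h' t (fun hx => hp (List.mem_cons_of_mem a hx)) hpre.2⟩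
          exact Or.inl hpf.isInfix
      · rcases ih hinf with h1 | h2
        · exact Or.inl (h1.trans (List.infix_cons (List.infix_refl h')))
        · exact Or.inr h2
  · intro hor
    rcases hor with h1 | h2
    · exact h1.trans ⟨[], '/' :: t, by simp⟩
    · have h3 : t <:+: h ++ '/' :: t := ⟨h ++ ['/'], [], by simp⟩
      exact h2.trans h3

-- occurrence in the string ↔ occurrence in some component
lemma pvInfix_mySplit (p s : List Char) (hp : '/' ∉ p) :
    p <:+: s ↔ ∃ x ∈ pvMySplit s, p <:+: x := by
  induction s using pvMySplit.induct with
  | case1 s q hf ih =>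
    have hf' : (pvPartitionSlash s).2.1 = true := hf
    have ih' : p <:+: (pvPartitionSlash s).2.2 ↔
        ∃ x ∈ pvMySplit (pvPartitionSlash s).2.2, p <:+: x := ih
    rw [pvMySplit]
    simp only [hf', dite_true]
    obtain ⟨hs, -⟩ := pvPartition_found s hf'
    rw [show (p <:+: s) = (p <:+: (pvPartitionSlash s).1 ++ '/' :: (pvPartitionSlash s).2.2) from by
      rw [← hs]]
    rw [pvInfix_split p _ _ hp, ih']
    simp only [List.mem_cons]
    constructor
    · rintro (h1 | ⟨x, hx, h2⟩)
      · exact ⟨(pvPartitionSlash s).1, Or.inl rfl, h1⟩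
      · exact ⟨x, Or.inr hx, h2⟩
    · rintro ⟨x, hx | hx, h2⟩
      · exact Or.inl (hx ▸ h2)
      · exact Or.inr ⟨x, hx, h2⟩
  | case2 s q hf =>
    have hf' : ¬ ((pvPartitionSlash s).2.1 = true) := hf
    rw [pvMySplit]
    simp [hf']

-- A's index loop computes pvFirstIdx
lemma pvStrIsIn_ofList (x : List Char) :
    PySem.Str.isIn "datastore" (String.ofList x) = PySem.Chars.isIn pvDS x := by
  simp [PySem.Str.isIn, String.toList_ofList]
  rfl

lemma pvFindLoop_eq (l : List (List Char)) (hex : ∃ x ∈ l, PySem.Chars.isIn pvDS x = true) (n : Int) :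
    pvFindLoop (l.map String.ofList) n = n + pvFirstIdx l := by
  induction l generalizing n with
  | nil => simp at hex
  | cons x r ih =>
    rw [List.map_cons]
    by_cases hx : PySem.Chars.isIn pvDS x = true
    · rw [pvFindLoop, pvFirstIdx, pvStrIsIn_ofList, if_pos hx, if_pos hx]
      simp
    · have hex' : ∃ y ∈ r, PySem.Chars.isIn pvDS y = true := by
        rcases hex with ⟨y, hy, hiy⟩
        rcases List.mem_cons.mp hy with rfl | hy'
        · exact absurd hiy hx
        · exact ⟨y, hy', hiy⟩
      rw [pvFindLoop, pvFirstIdx, pvStrIsIn_ofList, if_neg hx, if_neg hx]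
      rw [ih hex' (n + 1)]
      push_cast
      ring

lemma pvDropAfter_eq_drop (l : List (List Char)) : pvDropAfter l = l.drop (pvFirstIdx l + 1) := by
  induction l with
  | nil => simp [pvDropAfter]
  | cons x r ih =>
    by_cases hx : PySem.Chars.isIn pvDS x = true
    · simp [pvDropAfter, pvFirstIdx, hx]
    · simp [pvDropAfter, pvFirstIdx, hx, ih]

-- xs[n:-1] = dropLast of drop
lemma pvSlice_nat_neg_one {α : Type} (xs : List α) (n : Nat) :
    PySem.List.slice xs (some (n : Int)) (some (-1)) = (xs.drop n).dropLast := by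
  simp only [PySem.List.slice, PySem.List.clampIdx]
  have h1 : ¬ ((n : Int) < 0) := by omega
  rw [if_neg h1]
  have h2 : ((-1 : Int) < 0) := by omega
  rw [if_pos h2]
  by_cases h3 : (xs.length : Int) + (-1) < 0
  · have hlen0 : xs.length = 0 := by omega
    rw [List.eq_nil_of_length_eq_zero hlen0]
    simp
  · rw [if_neg h3]
    have hd : List.drop (min ((n : Int)).toNat xs.length) xs = List.drop n xs := by
      rw [Int.toNat_natCast]
      rcases Nat.le_total n xs.length with hle | hle
      · rw [Nat.min_eq_left hle]
      · rw [Nat.min_eq_right hle, List.drop_length, List.drop_eq_nil_of_le hle]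
    rw [hd, List.dropLast_eq_take]
    congr 1
    rw [List.length_drop]
    omega

lemma pvGetLast_cons {α : Type} (a : α) (l : List α) (h : l ≠ []) :
    (a :: l).getLast? = l.getLast? := by
  rw [show a :: l = [a] ++ l from rfl, List.getLast?_append_of_ne_nil _ h]

-- MAIN: A's "join of items after the target" is B's raw remainder
lemma pvMain (s : List Char) (h : pvDS <:+: s) :
    PySem.Chars.join ['/'] (pvDropAfter (pvMySplit s)) = pvRel s := by
  induction s using pvRel.induct with
  | case1 s q hin =>
    have hin' : PySem.Chars.isIn pvDS (pvPartitionSlash s).1 = true := hin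
    have hinT : PySem.Chars.isIn "datastore".toList (pvPartitionSlash s).1 = true := hin
    rw [pvRel, if_pos hinT]
    by_cases hf : (pvPartitionSlash s).2.1 = true
    · rw [pvMySplit, dif_pos hf]
      simp only [pvDropAfter, hin', if_true]
      exact pvJoin_mySplit _
    · obtain ⟨h1, h2, -⟩ := pvPartition_not_found s (by simpa using hf)
      have hins : PySem.Chars.isIn pvDS s = true := by rw [← h1]; exact hin'
      rw [pvMySplit, dif_neg hf]
      simp only [pvDropAfter, hins, if_true]
      rw [h2]
      exact PySem.Chars.join_nil _
  | case2 s q hnin hf ih =>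
    have hninG : ¬ (PySem.Chars.isIn "datastore".toList (pvPartitionSlash s).1 = true) := hnin
    have hnin' : PySem.Chars.isIn pvDS (pvPartitionSlash s).1 = false := by
      have hx : ¬ PySem.Chars.isIn pvDS (pvPartitionSlash s).1 = true := hnin
      simpa using hx
    have hf' : (pvPartitionSlash s).2.1 = true := hf
    obtain ⟨hs, -⟩ := pvPartition_found s hf'
    have hsub : pvDS <:+: (pvPartitionSlash s).2.2 := by
      have hsl : '/' ∉ pvDS := by decide
      have hd := (pvInfix_split pvDS (pvPartitionSlash s).1 (pvPartitionSlash s).2.2 hsl).mp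
        (by rw [← hs]; exact h)
      rcases hd with hd | hd
      · exact absurd hd ((PySem.Chars.isIn_eq_false_iff _ _).mp hnin')
      · exact hd
    rw [pvRel, if_neg hninG, dif_pos hf', pvMySplit, dif_pos hf']
    simp only [pvDropAfter, hnin', Bool.false_eq_true, if_false]
    exact ih hsub
  | case3 s q hnin hf =>
    obtain ⟨h1, -, -⟩ := pvPartition_not_found s (by simpa using (hf : ¬ (pvPartitionSlash s).2.1 = true))
    have hins : PySem.Chars.isIn pvDS s = true :=
      (PySem.Chars.isIn_iff_infix _ _).mpr h
    have : PySem.Chars.isIn pvDS (pvPartitionSlash s).1 = true := by rw [h1]; exact hins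
    exact absurd this (by simpa using (hnin : ¬ PySem.Chars.isIn pvDS (pvPartitionSlash s).1 = true))

-- trailing-slash bookkeeping
lemma pvLast_mySplit (s : List Char) (hs : s ≠ []) :
    ((pvMySplit s).getLast? = some [] ↔ s.getLast? = some '/') := by
  induction s using pvMySplit.induct with
  | case1 s q hf ih =>
    have hf' : (pvPartitionSlash s).2.1 = true := hf
    obtain ⟨hseq, -⟩ := pvPartition_found s hf'
    have ihG : (pvPartitionSlash s).2.2 ≠ [] →
        ((pvMySplit (pvPartitionSlash s).2.2).getLast? = some [] ↔
          (pvPartitionSlash s).2.2.getLast? = some '/') := ih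
    rw [pvMySplit, dif_pos hf']
    rw [pvGetLast_cons _ _ (pvMySplit_ne_nil _)]
    by_cases ht : (pvPartitionSlash s).2.2 = []
    · rw [ht, pvMySplit_nil]
      rw [ht] at hseq
      constructor
      · intro _
        rw [hseq]
        exact List.getLast?_concat
      · intro _
        rfl
    · rw [ihG ht]
      conv_rhs => rw [hseq]
      rw [List.getLast?_append_of_ne_nil _ (List.cons_ne_nil _ _), pvGetLast_cons _ _ ht]
  | case2 s q hf =>
    have hf' : ¬ ((pvPartitionSlash s).2.1 = true) := hf
    obtain ⟨h1, -, h3⟩ := pvPartition_not_found s (by simpa using hf')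
    rw [pvMySplit, dif_neg hf']
    constructor
    · intro hx
      have : s = [] := by simpa using hx
      exact absurd this hs
    · intro hx
      rcases List.getLast?_eq_some_iff.mp hx with ⟨ys, hys⟩
      exact absurd (by rw [hys]; simp : ('/' : Char) ∈ s) h3

lemma pvJoin_dropLast (l : List (List Char)) (h : l.getLast? = some []) :
    PySem.Chars.join ['/'] l.dropLast = (PySem.Chars.join ['/'] l).dropLast := by
  induction l with
  | nil => simp at h
  | cons x l' ih =>
    rcases l' with _ | ⟨y, r⟩
    · have hx0 : x = [] := by simpa using h
      subst hx0
      simp [PySem.Chars.join_singleton, PySem.Chars.join_nil]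
    · rw [List.getLast?_cons_cons] at h
      rcases r with _ | ⟨z, r'⟩
      · have hy0 : y = [] := by simpa using h
        subst hy0
        rw [PySem.Chars.join_cons_cons]
        simp [PySem.Chars.join_singleton]
      · have hjne : PySem.Chars.join ['/'] (y :: z :: r') ≠ [] := by
          rw [PySem.Chars.join_cons_cons]
          simp
        rw [List.dropLast_cons_of_ne_nil (List.cons_ne_nil _ _),
          List.dropLast_cons_of_ne_nil (List.cons_ne_nil _ _),
          PySem.Chars.join_cons_cons,
          PySem.Chars.join_cons_cons,
          List.dropLast_append_of_ne_nil hjne]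
        have ih2 : PySem.Chars.join ['/'] (y :: (z :: r').dropLast)
            = (PySem.Chars.join ['/'] (y :: z :: r')).dropLast := by
          rw [← List.dropLast_cons_of_ne_nil (List.cons_ne_nil _ _)]
          exact ih h
        rw [ih2]

lemma pvGetLast_drop {α : Type} (l : List α) (n : Nat) (h : l.drop n ≠ []) :
    (l.drop n).getLast? = l.getLast? := by
  induction n generalizing l with
  | zero => simp
  | succ n ih =>
    rcases l with _ | ⟨x, l'⟩
    · simp at h
    · rw [List.drop_succ_cons] at h ⊢
      have hl' : l' ≠ [] := by
        intro he
        rw [he, List.drop_nil] at h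
        exact h rfl
      rw [ih l' h, pvGetLast_cons _ _ hl']

lemma pvPyGetD_concat {α : Type} (xs : List α) (a d : α) :
    PySem.List.pyGetD (xs ++ [a]) (-1) d = a := by
  rw [PySem.List.pyGetD_neg_ofNat (xs ++ [a]) 1 d (by omega) (by simp)]
  simp

lemma pvStrJoin (l : List (List Char)) :
    PySem.Str.join "/" (l.map String.ofList) = String.ofList (PySem.Chars.join ['/'] l) := by
  simp [PySem.Str.join, List.map_map, Function.comp_def, String.toList_ofList]

-- ===== VERDICT (by name: the statement is the Claim_ definition above) =====
theorem get_datastore_relative_path_spec : Claim_equal_get_datastore_relative_path := by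
  intro path _hdom hpre
  unfold Spec_get_datastore_relative_path
  have hIn : PySem.Chars.isIn pvDS path.toList = true := hpre
  have hinf : pvDS <:+: path.toList := (PySem.Chars.isIn_iff_infix _ _).mp hIn
  have hne : path.toList ≠ [] := by
    intro h0
    rw [h0, List.infix_nil] at hinf
    exact absurd hinf (by decide)
  have hsep : ("/" : String).toList = ['/'] := rfl
  -- shorthands
  set M := pvMySplit path.toList with hMdef
  set k := pvFirstIdx M with hkdef
  have hsplit : (PySem.Str.split? path "/").getD [] = M.map String.ofList := by
    simp only [PySem.Str.split?, PySem.Chars.split?, hsep]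
    rw [if_neg (by simp), pvSplitOn_eq]
    rfl
  have hex : ∃ x ∈ M, PySem.Chars.isIn pvDS x = true := by
    rcases (pvInfix_mySplit pvDS path.toList (by decide)).mp hinf with ⟨x, hx, hin⟩
    exact ⟨x, hx, (PySem.Chars.isIn_iff_infix _ _).mpr hin⟩
  have htgt : pvFindLoop (M.map String.ofList) 0 = (k : Int) := by
    rw [pvFindLoop_eq M hex 0]
    ring
  -- last item of the split
  rcases hgl : M.getLast? with _ | mlast
  · exact absurd (List.getLast?_eq_none_iff.mp hgl) (pvMySplit_ne_nil _)
  rcases List.getLast?_eq_some_iff.mp hgl with ⟨minit, hMconcat⟩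
  have hlastget : PySem.List.pyGetD (M.map String.ofList) (-1) "" = String.ofList mlast := by
    rw [hMconcat, List.map_append]
    exact pvPyGetD_concat _ _ _
  -- the trailing-slash test on both sides
  have hendsIff : PySem.Str.endswith path "/" = true ↔ path.toList.getLast? = some '/' := by
    show PySem.Chars.endswith path.toList ("/" : String).toList = true ↔ _
    rw [hsep]
    show List.isSuffixOf ['/'] path.toList = true ↔ _
    rw [List.isSuffixOf_iff_suffix, List.getLast?_eq_some_iff]
    constructor
    · rintro ⟨t, ht⟩
      exact ⟨t, ht.symm⟩
    · rintro ⟨ys, hys⟩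
      exact ⟨ys, hys.symm⟩
  have hendsM : PySem.Str.endswith path "/" = true ↔ mlast = [] := by
    rw [hendsIff, ← pvLast_mySplit path.toList hne, ← hMdef, hgl]
    simp
  -- cast for the slice start
  have hcast : ((k : Int) + 1) = ((k + 1 : Nat) : Int) := by push_cast; ring
  have hdropA : pvDropAfter M = M.drop (k + 1) := pvDropAfter_eq_drop M
  have hmain : PySem.Chars.join ['/'] (pvDropAfter M) = pvRel path.toList :=
    pvMain path.toList hinf
  simp only [get_datastore_relative_path, get_datastore_relative_path_alt,
    hsplit, htgt, hlastget]
  by_cases hml : mlast = []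
  · -- path ends with '/': both sides drop one trailing component/character
    rw [if_neg (by simp [hml]), if_pos (hendsM.mpr hml)]
    rw [hcast, pvSlice_nat_neg_one, ← List.map_drop, ← List.map_dropLast, pvStrJoin]
    have hB : PySem.Str.slice (String.ofList (pvRel path.toList)) none (some (-1))
        = String.ofList ((pvRel path.toList).dropLast) := by
      simp only [PySem.Str.slice, PySem.Chars.slice, String.toList_ofList]
      rw [PySem.List.slice_to_neg_one]
    rw [hB]
    congr 1
    rw [← hmain, ← hdropA]
    rcases hD : pvDropAfter M with _ | ⟨d0, dr⟩
    · simp [PySem.Chars.join_nil]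
    · have hDne : pvDropAfter M ≠ [] := by rw [hD]; exact List.cons_ne_nil _ _
      have hDlast : (pvDropAfter M).getLast? = some [] := by
        rw [hdropA] at hDne ⊢
        rw [pvGetLast_drop M (k + 1) hDne, hgl, hml]
      rw [← hD]
      exact pvJoin_dropLast _ hDlast
  · -- no trailing slash: both sides return the raw remainder
    rw [if_pos (by simp [hml]),
      if_neg (fun hh => hml (hendsM.mp hh))]
    rw [hcast, PySem.List.slice_from_natCast, ← List.map_drop, pvStrJoin]
    congr 1
    rw [← hdropA]
    exact hmain
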